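-- pv_equiv track=rewrite | github.com/naspatterns/sanskrit_tibetan_workspace | scripts/lib/snippet.py | _pick_snippet
-- ===== SOURCE A (Python) =====
-- def _pick_snippet(text: str, boundaries: list[int], target: int, max_len: int) -> str:
--     """Pick a snippet of approximately `target` chars, never exceeding `max_len`.
--
--     Prefers the largest boundary that fits under `max_len`. If the first
--     boundary already exceeds max_len, falls back to a word-boundary trim.
--     """
--     if not text:
--         return ""
--     if len(text) <= max_len:
--         return text.strip()
--
--     # Filter boundaries that fit under max_len
--     candidates = [b for b in boundaries if b <= max_len]
--     if candidates:
--         # Prefer the boundary closest to target (without going over max_len)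
--         best = min(candidates, key=lambda b: abs(b - target) if b >= target else (target - b) + max_len)
--         return text[:best].rstrip(" ;.-").strip()
--
--     # Fall back to word boundary. Reserve 1 char for the ellipsis to stay within max_len.
--     cut = text.rfind(" ", 0, max_len - 1)
--     if cut > 0:
--         return (text[:cut].rstrip(" ;.-").strip() + "…")[:max_len]
--     return (text[: max_len - 1].strip() + "…")[:max_len]
-- ===== SOURCE B (Python) =====
-- def _pick_snippet(text: str, boundaries: list[int], target: int, max_len: int) -> str:
--     """Sort-then-scan: sort the boundaries once, then walk the ascending order,
--     remembering the last boundary that fits; stop at the first boundary that is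
--     > max_len (nothing later can fit) or >= target (nothing later is closer)."""
--     if not text:
--         return ""
--     if len(text) <= max_len:
--         return text.strip()
--
--     best = None
--     for b in sorted(boundaries):
--         if b > max_len:
--             break
--         best = b
--         if b >= target:
--             break
--
--     if best is not None:
--         return text[:best].rstrip(" ;.-").strip()
--
--     cut = text.rfind(" ", 0, max_len - 1)
--     if cut > 0:
--         return (text[:cut].rstrip(" ;.-").strip() + "…")[:max_len]
--     return (text[: max_len - 1].strip() + "…")[:max_len]
-- ===== Notes on version B (the rewrite author's own statement) =====
-- stated objective: alternative
-- what changed: Replaces A's candidate-list comprehension plus min() with an arithmetic piecewise key by sort-then-scan: sort the boundaries once and walk them in ascending order, keeping the last fitting boundary and stopping at the first one that exceeds max_len or reaches target.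
-- outside the precondition, e.g. on _pick_snippet('abcdefg', [5, -11], -10, 5): A returns '', B returns 'abcde'
import Mathlib
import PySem

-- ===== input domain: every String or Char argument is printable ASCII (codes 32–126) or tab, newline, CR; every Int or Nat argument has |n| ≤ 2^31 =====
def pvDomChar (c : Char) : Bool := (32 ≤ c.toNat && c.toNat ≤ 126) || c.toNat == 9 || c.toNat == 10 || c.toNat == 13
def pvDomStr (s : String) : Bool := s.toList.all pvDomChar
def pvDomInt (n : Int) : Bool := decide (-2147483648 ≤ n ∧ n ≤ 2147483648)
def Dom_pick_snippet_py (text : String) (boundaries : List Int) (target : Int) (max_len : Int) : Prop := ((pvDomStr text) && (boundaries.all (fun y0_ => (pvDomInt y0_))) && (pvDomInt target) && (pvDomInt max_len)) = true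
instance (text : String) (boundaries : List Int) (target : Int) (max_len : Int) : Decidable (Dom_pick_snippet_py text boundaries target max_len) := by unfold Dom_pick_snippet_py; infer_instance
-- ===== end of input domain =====

-- B replaces A's "build candidate list, then min() with an arithmetic piecewise key" by
-- sort-then-scan: sort the boundaries once and walk them in ascending order, keeping the
-- last fitting one and stopping at the first boundary > max_len or ≥ target;
-- objective: alternative algorithm, similar cost.


-- shared helpers: the lines of Python that are identical in A and in B
-- hand port of s.rstrip(" ;.-") (PySem has no chars-argument rstrip): drop trailing characters
-- of the set from the right; exact for any chars list.
def pvRstripChars (cs : List Char) (chars : List Char) : List Char :=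
  (cs.reverse.dropWhile (fun c => chars.contains c)).reverse

-- `.rstrip(" ;.-").strip()`
def pvStripTail (cs : List Char) : List Char :=
  PySem.Chars.strip (pvRstripChars cs [' ', ';', '.', '-'])

-- the word-boundary fallback block, identical in A and B:
--   cut = text.rfind(" ", 0, max_len - 1)
--   if cut > 0: return (text[:cut].rstrip(" ;.-").strip() + "…")[:max_len]
--   return (text[: max_len - 1].strip() + "…")[:max_len]
def pvFallback (cs : List Char) (max_len : Int) : String :=
  let cut := PySem.Chars.rfindFrom cs [' '] 0 (some (max_len - 1))
  if 0 < cut then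
    String.ofList (PySem.Chars.slice (pvStripTail (PySem.Chars.slice cs none (some cut)) ++ ['…']) none (some max_len))
  else
    String.ofList (PySem.Chars.slice (PySem.Chars.strip (PySem.Chars.slice cs none (some (max_len - 1))) ++ ['…']) none (some max_len))

-- ===== PORT A =====
def pick_snippet_py (text : String) (boundaries : List Int) (target : Int) (max_len : Int) : String :=
  let cs := text.toList
  if cs = [] then ""
  else if (cs.length : Int) ≤ max_len then String.ofList (PySem.Chars.strip cs)
  else
    let candidates := boundaries.filter (fun b => decide (b ≤ max_len))
    match PySem.List.min? candidates
        (fun b => if target ≤ b then |b - target| else (target - b) + max_len) with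
    | some best => String.ofList (pvStripTail (PySem.Chars.slice cs none (some best)))
    | none => pvFallback cs max_len

-- ===== PORT B =====
-- the scan loop over the sorted boundaries:
--   for b in sorted(boundaries):
--       if b > max_len: break
--       best = b
--       if b >= target: break
def pvScan (target max_len : Int) : List Int → Option Int → Option Int
  | [], best => best
  | b :: t, best =>
      if max_len < b then best
      else if target ≤ b then some b
      else pvScan target max_len t (some b)

def pick_snippet_py_alt (text : String) (boundaries : List Int) (target : Int) (max_len : Int) : String :=
  let cs := text.toList
  if cs = [] then ""
  else if (cs.length : Int) ≤ max_len then String.ofList (PySem.Chars.strip cs)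
  else
    match pvScan target max_len (PySem.List.sorted boundaries (fun x => x) false) none with
    | some best => String.ofList (pvStripTail (PySem.Chars.slice cs none (some best)))
    | none => pvFallback cs max_len

-- ===== PRECONDITION & SPEC =====
-- Pre_ restricts to the function's natural domain: target is a desired snippet length, so 0 ≤ target.
-- For negative target A's arithmetic key can prefer a boundary far below target over one at target
-- (and can tie across the two branches), an accident of the key's encoding that B does not reproduce.
def Pre_pick_snippet_py (text : String) (boundaries : List Int) (target : Int) (max_len : Int) : Prop :=
  0 ≤ target
instance (text : String) (boundaries : List Int) (target : Int) (max_len : Int) : Decidable (Pre_pick_snippet_py text boundaries target max_len) := by unfold Pre_pick_snippet_py; infer_instance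

def pvWitness_pick_snippet_py : String × List Int × Int × Int :=
  ("hello world; and some more text", [5, 11, 20], 12, 24)

def Spec_pick_snippet_py (text : String) (boundaries : List Int) (target : Int) (max_len : Int) (out : String) : Prop := out = pick_snippet_py_alt text boundaries target max_len
instance (text : String) (boundaries : List Int) (target : Int) (max_len : Int) (out : String) : Decidable (Spec_pick_snippet_py text boundaries target max_len out) := by unfold Spec_pick_snippet_py; infer_instance

-- ===== CLAIM (what is proved, stated in full; the proofs are below) =====
def Claim_equal_pick_snippet_py : Prop := ∀ (text : String) (boundaries : List Int) (target : Int) (max_len : Int), Dom_pick_snippet_py text boundaries target max_len → Pre_pick_snippet_py text boundaries target max_len → Spec_pick_snippet_py text boundaries target max_len (pick_snippet_py text boundaries target max_len)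

-- ===== LEMMAS AND PROOFS =====

-- A's piecewise key is injective on boundaries ≤ max_len when 0 ≤ target
theorem pvKeyInj (target max_len x y : Int) (ht : 0 ≤ target) (hx : x ≤ max_len) (hy : y ≤ max_len)
    (h : (if target ≤ x then |x - target| else (target - x) + max_len)
       = (if target ≤ y then |y - target| else (target - y) + max_len)) : x = y := by
  split_ifs at h with h1 h2 h2
  · rw [abs_of_nonneg (by omega), abs_of_nonneg (by omega)] at h; omega
  · rw [abs_of_nonneg (by omega)] at h; omega
  · rw [abs_of_nonneg (by omega)] at h; omega
  · omega

-- invariant of B's scan over a sorted list: the result is none exactly when there is no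
-- candidate, and otherwise it is the smallest candidate ≥ target if one exists, else the
-- largest candidate (all of which are then < target)
theorem pvScan_spec (target max_len : Int) (s : List Int) (hs : s.Pairwise (· ≤ ·))
    (acc : Option Int) (hacc : ∀ c, acc = some c → c ≤ max_len ∧ c < target) :
    (pvScan target max_len s acc = none → acc = none ∧ ∀ b ∈ s, ¬ b ≤ max_len)
    ∧ (∀ v, pvScan target max_len s acc = some v →
        v ≤ max_len ∧ (v ∈ s ∨ acc = some v) ∧
        ((target ≤ v ∧ ∀ b ∈ s, b ≤ max_len → target ≤ b → v ≤ b)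
         ∨ (v < target ∧ (∀ b ∈ s, b ≤ max_len → b ≤ v)
            ∧ ∀ b ∈ s, b ≤ max_len → ¬ target ≤ b))) := by
  induction s generalizing acc with
  | nil =>
      refine ⟨fun h => ⟨h, by simp⟩, fun v hv => ?_⟩
      have := hacc v hv
      exact ⟨this.1, Or.inr hv, Or.inr ⟨this.2, by simp, by simp⟩⟩
  | cons b t ih =>
      have hbt : ∀ y ∈ t, b ≤ y := (List.pairwise_cons.mp hs).1
      have hst : t.Pairwise (· ≤ ·) := (List.pairwise_cons.mp hs).2
      by_cases h1 : max_len < b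
      · -- break: b (and by sortedness everything after) does not fit
        have hall : ∀ y ∈ (b :: t), ¬ y ≤ max_len := by
          intro y hy
          rcases List.mem_cons.mp hy with rfl | hy
          · omega
          · have := hbt y hy; omega
        simp only [pvScan, if_pos h1]
        refine ⟨fun h => ⟨h, hall⟩, fun v hv => ?_⟩
        have := hacc v hv
        exact ⟨this.1, Or.inr hv,
          Or.inr ⟨this.2, fun y hy hyc => absurd hyc (hall y hy), fun y hy hyc => absurd hyc (hall y hy)⟩⟩
      · by_cases h2 : target ≤ b
        · -- break: b is the first (hence smallest) candidate ≥ target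
          simp only [pvScan, if_neg h1, if_pos h2]
          refine ⟨fun h => absurd h (by simp), fun v hv => ?_⟩
          have hvb : v = b := by cases hv; rfl
          subst hvb
          refine ⟨by omega, Or.inl List.mem_cons_self, Or.inl ⟨h2, ?_⟩⟩
          intro y hy _ _
          rcases List.mem_cons.mp hy with rfl | hy
          · exact le_refl _
          · exact hbt y hy
        · -- continue with best = b
          simp only [pvScan, if_neg h1, if_neg h2]
          have hacc' : ∀ c, (some b : Option Int) = some c → c ≤ max_len ∧ c < target := by
            intro c hc; cases hc; exact ⟨by omega, by omega⟩
          obtain ⟨ihn, ihs⟩ := ih hst (some b) hacc'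
          refine ⟨fun h => absurd (ihn h).1 (by simp), fun v hv => ?_⟩
          obtain ⟨hv1, hv2, hv3⟩ := ihs v hv
          have hvmem : v ∈ b :: t ∨ acc = some v := by
            rcases hv2 with hv2 | hv2
            · exact Or.inl (List.mem_cons_of_mem _ hv2)
            · cases hv2; exact Or.inl List.mem_cons_self
          refine ⟨hv1, hvmem, ?_⟩
          rcases hv3 with ⟨ha, hmin⟩ | ⟨ha, hmax, hno⟩
          · refine Or.inl ⟨ha, fun y hy hyc hyt => ?_⟩
            rcases List.mem_cons.mp hy with rfl | hy
            · omega
            · exact hmin y hy hyc hyt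
          · refine Or.inr ⟨ha, ?_, ?_⟩
            · intro y hy hyc
              rcases List.mem_cons.mp hy with rfl | hy
              · -- y = b: v came from t or is b itself; b ≤ v either way
                rcases hv2 with hv2 | hv2
                · exact hbt v hv2
                · cases hv2; exact le_refl _
              · exact hmax y hy hyc
            · intro y hy hyc
              rcases List.mem_cons.mp hy with rfl | hy
              · omega
              · exact hno y hy hyc

-- ===== VERDICT (by name: the statement is the Claim_ definition above) =====
theorem pick_snippet_py_spec : Claim_equal_pick_snippet_py := by
  intro text boundaries target max_len _ hpre
  unfold Pre_pick_snippet_py at hpre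
  unfold Spec_pick_snippet_py pick_snippet_py pick_snippet_py_alt
  simp only
  by_cases h0 : text.toList = []
  · simp [h0]
  simp only [h0, if_false]
  by_cases h1 : (text.toList.length : Int) ≤ max_len
  · simp only [if_pos h1]
  simp only [h1, if_false]
  set s := PySem.List.sorted boundaries (fun x => x) false with hsdef
  have hperm : s.Perm boundaries := PySem.List.sorted_perm boundaries (fun x => x) false
  have hmem : ∀ y, y ∈ s ↔ y ∈ boundaries := fun y => hperm.mem_iff
  have hs : s.Pairwise (· ≤ ·) := PySem.List.sorted_pairwise boundaries (fun x => x)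
  set l := boundaries.filter (fun b => decide (b ≤ max_len)) with hl
  have hmeml : ∀ y, y ∈ l ↔ y ∈ s ∧ y ≤ max_len := by
    intro y
    rw [hl, List.mem_filter, hmem]
    simp
  set keyf := fun b => if target ≤ b then |b - target| else (target - b) + max_len with hk
  obtain ⟨hnone, hsome⟩ := pvScan_spec target max_len s hs none (by intro c hc; cases hc)
  -- key minimality transfers to equality via injectivity
  have main : ∀ best : Int, best ∈ l → (∀ y ∈ l, keyf best ≤ keyf y) →
      PySem.List.min? l keyf = some best := by
    intro best hbm hbmin
    cases hA : PySem.List.min? l keyf with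
    | none =>
        rw [PySem.List.min?_eq_none_iff] at hA
        rw [hA] at hbm; exact absurd hbm (List.not_mem_nil)
    | some m =>
        have hmm := PySem.List.min?_mem hA
        have hmin := PySem.List.min?_isMin hA
        have heq : keyf best = keyf m := le_antisymm (hbmin m hmm) (hmin best hbm)
        have hb2 := (hmeml best).mp hbm
        have hm2 := (hmeml m).mp hmm
        rw [pvKeyInj target max_len best m hpre hb2.2 hm2.2 heq]
  cases hr : pvScan target max_len s none with
  | none =>
      have hnc := (hnone hr).2
      have : l = [] := by
        rw [List.filter_eq_nil_iff]
        intro y hy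
        have := hnc y ((hmem y).mpr hy)
        simpa using this
      rw [this]
      rfl
  | some v =>
      obtain ⟨hv1, hv2, hv3⟩ := hsome v hr
      have hvs : v ∈ s := by
        rcases hv2 with h | h
        · exact h
        · exact absurd h (by simp)
      have hvl : v ∈ l := (hmeml v).mpr ⟨hvs, hv1⟩
      have : PySem.List.min? l keyf = some v := by
        apply main v hvl
        intro y hy
        obtain ⟨hys, hyc⟩ := (hmeml y).mp hy
        rcases hv3 with ⟨hvt, hmin⟩ | ⟨hvt, hmax, hno⟩
        · by_cases hyt : target ≤ y
          · have hle : v ≤ y := hmin y hys hyc hyt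
            simp only [hk, if_pos hvt, if_pos hyt]
            rw [abs_of_nonneg (by omega), abs_of_nonneg (by omega)]; omega
          · simp only [hk, if_pos hvt, if_neg hyt]
            rw [abs_of_nonneg (by omega)]; omega
        · have hyt : ¬ target ≤ y := hno y hys hyc
          have hle : y ≤ v := hmax y hys hyc
          simp only [hk, if_neg (by omega : ¬ target ≤ v), if_neg hyt]; omega
      rw [this]
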